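-- pv_equiv track=rewrite | github.com/crohan99/aoc2023 | d2/d2.py | highest_reveal_in_record
-- ===== SOURCE A (Python) =====
-- def highest_reveal_in_record(record: list):
--     highest_reveal = {'red': 0, 'green': 0, 'blue': 0}
--
--     for reveals in record:
--
--         for key, value in reveals.items():
--
--             if (key in highest_reveal.keys()):
--
--                 if (value > highest_reveal[key]):
--                     highest_reveal[key] = value
--
--     return highest_reveal
-- ===== SOURCE B (Python) =====
-- def highest_reveal_in_record(record: list):
--     return {c: max([0] + [reveals.get(c, 0) for reveals in record])
--             for c in ('red', 'green', 'blue')}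
-- ===== Notes on version B (the rewrite author's own statement) =====
-- stated objective: idiomatic
-- what changed: Replaces A's single combined pass that mutates a three-key max dict with a dict comprehension doing one independent max-scan per fixed color, flooring at 0 via the [0] baseline.
import Mathlib
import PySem

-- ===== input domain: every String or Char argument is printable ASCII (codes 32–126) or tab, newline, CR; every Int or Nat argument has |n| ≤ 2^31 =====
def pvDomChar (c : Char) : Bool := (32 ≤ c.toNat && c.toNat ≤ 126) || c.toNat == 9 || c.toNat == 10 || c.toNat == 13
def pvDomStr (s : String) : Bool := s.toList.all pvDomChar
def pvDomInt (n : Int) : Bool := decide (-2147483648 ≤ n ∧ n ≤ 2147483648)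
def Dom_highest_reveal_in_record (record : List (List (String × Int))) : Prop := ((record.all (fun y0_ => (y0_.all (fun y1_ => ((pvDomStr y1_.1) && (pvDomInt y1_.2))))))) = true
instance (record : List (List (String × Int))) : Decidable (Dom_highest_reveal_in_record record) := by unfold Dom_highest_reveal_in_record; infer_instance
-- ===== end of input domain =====

-- B replaces A's single combined max-updating pass with one independent per-color max scan (idiomatic; same cost).
-- ===== PORT A =====
def pvStepA (hr : PySem.Dict String Int) (kv : String × Int) : PySem.Dict String Int :=
  if hr.contains kv.1 then
    (if kv.2 > hr.getD kv.1 0 then hr.insert kv.1 kv.2 else hr)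
  else hr

def highest_reveal_in_record (record : List (List (String × Int))) : List (String × Int) :=
  (record.foldl
    (fun hr reveals => (PySem.Dict.ofList reveals).items.foldl pvStepA hr)
    (PySem.Dict.ofList [("red", 0), ("green", 0), ("blue", 0)])).items

-- ===== PORT B =====
def pvMaxColor (record : List (List (String × Int))) (c : String) : Int :=
  (PySem.List.max?
    ((0 : Int) :: record.map (fun reveals => (PySem.Dict.ofList reveals).getD c 0))
    (fun x => x)).getD 0

def highest_reveal_in_record_alt (record : List (List (String × Int))) : List (String × Int) :=
  ["red", "green", "blue"].map (fun c => (c, pvMaxColor record c))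

-- ===== PRECONDITION & SPEC =====
def Spec_highest_reveal_in_record (record : List (List (String × Int))) (out : List (String × Int)) : Prop := out = highest_reveal_in_record_alt record
instance (record : List (List (String × Int))) (out : List (String × Int)) : Decidable (Spec_highest_reveal_in_record record out) := by unfold Spec_highest_reveal_in_record; infer_instance

-- ===== CLAIM (what is proved, stated in full; the proofs are below) =====
def Claim_equal_highest_reveal_in_record : Prop := ∀ (record : List (List (String × Int))), Dom_highest_reveal_in_record record → Spec_highest_reveal_in_record record (highest_reveal_in_record record)

-- ===== LEMMAS AND PROOFS =====
theorem pvStep_mk (kv : String × Int) (a g b : Int) :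
    pvStepA (PySem.Dict.mk [("red", a), ("green", g), ("blue", b)]) kv
    = PySem.Dict.mk [("red", if kv.1 = "red" then max a kv.2 else a),
                     ("green", if kv.1 = "green" then max g kv.2 else g),
                     ("blue", if kv.1 = "blue" then max b kv.2 else b)] := by
  obtain ⟨k, v⟩ := kv
  by_cases hr : k = "red" <;> by_cases hg : k = "green" <;> by_cases hb : k = "blue" <;>
    simp_all [pvStepA, PySem.Dict.contains, PySem.Dict.getD, PySem.Dict.get?,
      PySem.Dict.insert, List.find?, max_def] <;>
    first
      | omega
      | (split_ifs <;> simp_all <;> omega)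
      | (rintro (h | h | h) <;> simp_all)

-- fcol extracts the per-color effect of A's inner loop
def fcol (c : String) (l : List (String × Int)) (v : Int) : Int :=
  l.foldl (fun v kv => if kv.1 = c then max v kv.2 else v) v

theorem inner_fold_mk (l : List (String × Int)) (a g b : Int) :
    l.foldl pvStepA (PySem.Dict.mk [("red", a), ("green", g), ("blue", b)])
    = PySem.Dict.mk [("red", fcol "red" l a), ("green", fcol "green" l g),
                     ("blue", fcol "blue" l b)] := by
  induction l generalizing a g b with
  | nil => rfl
  | cons kv t ih => simp only [List.foldl, pvStep_mk, ih, fcol]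

theorem fcol_not_mem (c : String) (l : List (String × Int)) (v : Int)
    (h : c ∉ l.map Prod.fst) : fcol c l v = v := by
  induction l generalizing v with
  | nil => rfl
  | cons kv t ih =>
    simp only [List.map_cons, List.mem_cons, not_or] at h
    simp only [fcol, List.foldl] at *
    rw [if_neg (fun hh => h.1 (Eq.symm hh))]
    exact ih v h.2

theorem fcol_mem (c : String) (x : Int) (l : List (String × Int)) (v : Int)
    (hnd : (l.map Prod.fst).Nodup) (hx : (c, x) ∈ l) : fcol c l v = max v x := by
  induction l generalizing v with
  | nil => cases hx
  | cons kv t ih =>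
    simp only [List.map_cons, List.nodup_cons] at hnd
    rcases List.mem_cons.mp hx with h | h
    · subst h
      simp only [fcol, List.foldl]
      exact fcol_not_mem c t (max v x) hnd.1
    · have hne : kv.1 ≠ c := by
        intro he
        exact hnd.1 (he ▸ (List.mem_map.mpr ⟨(c, x), h, by simp⟩))
      simp only [fcol, List.foldl, if_neg hne]
      exact ih v hnd.2 h

theorem fcol_dict (c : String) (d : PySem.Dict String Int) (v : Int)
    (hv : 0 ≤ v) (hnd : d.keys.Nodup) :
    fcol c d.items v = max v (d.getD c 0) := by
  cases h : d.get? c with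
  | none =>
    rw [PySem.Dict.getD_of_get?_eq_none d 0 h, max_eq_left hv]
    apply fcol_not_mem
    have := (PySem.Dict.get?_eq_none_iff_not_mem_keys d c).mp h
    simpa [PySem.Dict.keys] using this
  | some x =>
    rw [PySem.Dict.getD_of_get?_eq_some d 0 h]
    exact fcol_mem c x d.items v (by simpa [PySem.Dict.keys] using hnd)
      (PySem.Dict.mem_items_of_get?_eq_some d h)

theorem max?_cons_eq_foldl (xs : List Int) (v : Int) :
    PySem.List.max? (v :: xs) (fun x => x) = some (xs.foldl max v) := by
  induction xs generalizing v with
  | nil => rfl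
  | cons x t ih =>
    have h1 : PySem.List.max? (v :: x :: t) (fun y => y)
        = PySem.List.max? (max v x :: t) (fun y => y) := by
      show List.foldl _ _ _ = List.foldl _ _ _
      simp only [List.foldl]
      congr 1
      split_ifs with h
      · rw [max_eq_right h.le]
      · rw [max_eq_left (not_lt.mp h)]
    rw [h1, ih]
    rfl

theorem outer_eq (record : List (List (String × Int))) (c : String) (v : Int) (hv : 0 ≤ v) :
    record.foldl (fun v r => fcol c (PySem.Dict.ofList r).items v) v
    = record.foldl (fun v r => max v ((PySem.Dict.ofList r).getD c 0)) v := by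
  induction record generalizing v with
  | nil => rfl
  | cons r t ih =>
    simp only [List.foldl]
    rw [fcol_dict c _ v hv (PySem.Dict.nodup_keys_ofList r)]
    exact ih _ (le_trans hv (le_max_left _ _))

theorem pvMaxColor_eq (record : List (List (String × Int))) (c : String) :
    pvMaxColor record c = record.foldl (fun v r => fcol c (PySem.Dict.ofList r).items v) 0 := by
  rw [outer_eq record c 0 le_rfl]
  simp only [pvMaxColor, max?_cons_eq_foldl, Option.getD_some, List.foldl_map]

theorem outer_fold_mk (record : List (List (String × Int))) (a g b : Int) :
    record.foldl (fun hr reveals => (PySem.Dict.ofList reveals).items.foldl pvStepA hr)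
      (PySem.Dict.mk [("red", a), ("green", g), ("blue", b)])
    = PySem.Dict.mk
        [("red", record.foldl (fun v r => fcol "red" (PySem.Dict.ofList r).items v) a),
         ("green", record.foldl (fun v r => fcol "green" (PySem.Dict.ofList r).items v) g),
         ("blue", record.foldl (fun v r => fcol "blue" (PySem.Dict.ofList r).items v) b)] := by
  induction record generalizing a g b with
  | nil => rfl
  | cons r t ih => simp only [List.foldl, inner_fold_mk, ih]


-- ===== VERDICT (by name: the statement is the Claim_ definition above) =====
theorem highest_reveal_in_record_spec : Claim_equal_highest_reveal_in_record := by
  intro record _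
  show highest_reveal_in_record record = highest_reveal_in_record_alt record
  have hinit : PySem.Dict.ofList [("red", (0 : Int)), ("green", 0), ("blue", 0)]
      = PySem.Dict.mk [("red", 0), ("green", 0), ("blue", 0)] := by rfl
  simp only [highest_reveal_in_record, highest_reveal_in_record_alt, hinit, outer_fold_mk,
    List.map_cons, List.map_nil, pvMaxColor_eq]
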